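-- pv_equiv track=rewrite | github.com/streamlit/streamlit-example | utils.py | bin_packing_fair_seeding
-- ===== SOURCE A (Python) =====
-- def bin_packing_fair_seeding(teams, group_size):
--     """
--     Distribute teams into groups to minimize the average point difference between groups.
--
--     This function sorts teams by their points and then assigns them to groups in a way that
--     aims to balance the total points in each group. Teams are distributed alternatively to
--     each group based on their ranking.
--
--     Parameters:
--     - teams (list of tuples): List where each tuple contains team information (name, points).
--     - group_size (int): The number of teams in each group.
--
--     Returns:
--     - list: A list of groups, each group is a list of teams.
--     """
--     if len(teams) < group_size:
--         return []
--
--     teams.sort(key=lambda x: x[1], reverse=True)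
--     num_groups = len(teams) // group_size
--     groups = [[] for _ in range(num_groups)]
--
--     for i, team in enumerate(teams):
--         index = i % num_groups if i // num_groups % 2 == 0 else num_groups - 1 - (i % num_groups)
--         groups[index].append(team)
--
--     return groups
-- ===== SOURCE B (Python) =====
-- def bin_packing_fair_seeding(teams, group_size):
--     """Serpentine seeding, built group-by-group: each group's members are read
--     directly off the sorted list by a closed-form per-round position, instead of
--     a single pass that appends each team into a modularly-computed group.
--     (Sorts `teams` in place, like the original.)"""
--     if len(teams) < group_size:
--         return []
--
--     teams.sort(key=lambda x: x[1], reverse=True)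
--     n = len(teams)
--     g = n // group_size
--     groups = []
--     for j in range(g):
--         grp = []
--         r = 0
--         while r * g < n:
--             i = r * g + (j if r % 2 == 0 else g - 1 - j)
--             if i < n:
--                 grp.append(teams[i])
--             r += 1
--         groups.append(grp)
--     return groups
-- ===== Notes on version B (the rewrite author's own statement) =====
-- stated objective: alternative
-- what changed: B builds the result group-by-group, reading each group's members directly off the sorted list at closed-form per-round positions (r*g + j or r*g + g-1-j), instead of A's single pass over all teams appending each one into a modularly-indexed group.
import Mathlib
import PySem

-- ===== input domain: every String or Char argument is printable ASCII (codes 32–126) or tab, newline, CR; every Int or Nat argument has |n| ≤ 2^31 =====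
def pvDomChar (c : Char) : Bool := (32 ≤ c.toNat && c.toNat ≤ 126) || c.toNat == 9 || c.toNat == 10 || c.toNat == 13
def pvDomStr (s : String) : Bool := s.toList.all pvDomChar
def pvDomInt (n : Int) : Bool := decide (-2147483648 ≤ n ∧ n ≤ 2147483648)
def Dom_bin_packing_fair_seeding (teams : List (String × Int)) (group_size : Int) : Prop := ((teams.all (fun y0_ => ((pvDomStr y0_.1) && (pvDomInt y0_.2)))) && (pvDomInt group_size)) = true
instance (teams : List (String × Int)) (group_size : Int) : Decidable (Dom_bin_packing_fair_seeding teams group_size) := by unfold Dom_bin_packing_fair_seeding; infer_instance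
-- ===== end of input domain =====

-- B rebuilds the serpentine seeding group-by-group from closed-form per-round positions
-- instead of A's single pass appending each team into a modularly-indexed group (objective:
-- alternative). Both A and B sort `teams` in place in Python; equivalence is about the return value.

-- ===== PORT A =====
def bin_packing_fair_seeding (teams : List (String × Int)) (group_size : Int) : List (List (String × Int)) :=
  if (teams.length : Int) < group_size then []
  else
    let ts := PySem.List.sorted teams (fun x => x.2) true
    let num_groups := PySem.Int.floordiv (ts.length : Int) group_size
    let init : List (List (String × Int)) := List.replicate num_groups.toNat []
    (PySem.List.enumerate ts 0).foldl (fun groups p =>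
      let index : Int :=
        if PySem.Int.mod (PySem.Int.floordiv p.1 num_groups) 2 = 0 then PySem.Int.mod p.1 num_groups
        else num_groups - 1 - PySem.Int.mod p.1 num_groups
      -- groups[index].append(team): under Pre_ the index is always in range, where pyGetD/pySetD are exact
      PySem.List.pySetD groups index ((PySem.List.pyGetD groups index []) ++ [p.2])) init

-- ===== PORT B =====
-- the `while r * g < n` loop of Source B; `0 < g` in the guard only makes the recursion total
-- (whenever the loop runs in Source B, g ≥ 1)
def pvAltLoop (ts : List (String × Int)) (n g j : Int) (r : Int) (grp : List (String × Int)) :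
    List (String × Int) :=
  if _h : r * g < n ∧ 0 < g then
    let i := r * g + (if PySem.Int.mod r 2 = 0 then j else g - 1 - j)
    pvAltLoop ts n g j (r + 1) (if i < n then grp ++ [PySem.List.pyGetD ts i ("", 0)] else grp)
  else grp
termination_by (n - r * g).toNat
decreasing_by
  have hg : (r + 1) * g = r * g + g := by ring
  omega

def bin_packing_fair_seeding_alt (teams : List (String × Int)) (group_size : Int) :
    List (List (String × Int)) :=
  if (teams.length : Int) < group_size then []
  else
    let ts := PySem.List.sorted teams (fun x => x.2) true
    let n : Int := (ts.length : Int)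
    let g : Int := PySem.Int.floordiv n group_size
    (PySem.List.pyRange 0 g 1).map (fun j => pvAltLoop ts n g j 0 [])

-- ===== PRECONDITION & SPEC =====
-- Pre_ excludes exactly the inputs where the Python A raises: group_size = 0 (ZeroDivisionError)
-- and group_size < 0 with a nonempty list (IndexError on groups[index] with groups == []).
def Pre_bin_packing_fair_seeding (teams : List (String × Int)) (group_size : Int) : Prop :=
  1 ≤ group_size ∨ (teams = [] ∧ group_size < 0)
instance (teams : List (String × Int)) (group_size : Int) :
    Decidable (Pre_bin_packing_fair_seeding teams group_size) := by
  unfold Pre_bin_packing_fair_seeding; infer_instance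

def pvWitness_bin_packing_fair_seeding : (List (String × Int)) × Int :=
  ([("a", 3), ("b", 1)], 1)

def Spec_bin_packing_fair_seeding (teams : List (String × Int)) (group_size : Int)
    (out : List (List (String × Int))) : Prop :=
  out = bin_packing_fair_seeding_alt teams group_size
instance (teams : List (String × Int)) (group_size : Int) (out : List (List (String × Int))) :
    Decidable (Spec_bin_packing_fair_seeding teams group_size out) := by
  unfold Spec_bin_packing_fair_seeding; infer_instance

-- ===== CLAIM (what is proved, stated in full; the proofs are below) =====
def Claim_equal_bin_packing_fair_seeding : Prop :=
  ∀ (teams : List (String × Int)) (group_size : Int),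
    Dom_bin_packing_fair_seeding teams group_size →
    Pre_bin_packing_fair_seeding teams group_size →
    Spec_bin_packing_fair_seeding teams group_size (bin_packing_fair_seeding teams group_size)


-- ===== LEMMAS AND PROOFS =====

-- Nat-level serpentine index of the i-th team (A's modular formula)
def pvIdxN (G i : Nat) : Nat := if (i / G) % 2 = 0 then i % G else G - 1 - i % G

-- position inside round r that lands in group j
def pvK0 (G j r : Nat) : Nat := if r % 2 = 0 then j else G - 1 - j

-- B's per-round pick for group j
def pvPickN (ts : List (String × Int)) (G j r : Nat) : Option (String × Int) :=
  if h : r * G + pvK0 G j r < ts.length then some (ts[r * G + pvK0 G j r]'h) else none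

theorem pvIdxN_lt (G i : Nat) (hG : 0 < G) : pvIdxN G i < G := by
  unfold pvIdxN
  have := Nat.mod_lt i hG
  split <;> omega

theorem pvK0_lt (G j r : Nat) (hj : j < G) : pvK0 G j r < G := by
  unfold pvK0; split <;> omega

theorem pvCeil_iff (G n r : Nat) (hG : 0 < G) : r * G < n ↔ r < (n + G - 1) / G := by
  rw [show (r < (n + G - 1) / G ↔ r + 1 ≤ (n + G - 1) / G) from Iff.rfl,
      Nat.le_div_iff_mul_le hG]
  have h1 : (r + 1) * G = r * G + G := by ring
  omega

-- filter a zipIdx block for one target index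
theorem pvBlk (bs : List (String × Int)) : ∀ (s t : Nat),
    ((bs.zipIdx s).filter (fun p => p.2 == t)).map Prod.fst =
      if h : s ≤ t ∧ t - s < bs.length then [bs[t - s]'h.2] else [] := by
  induction bs with
  | nil => intro s t; simp
  | cons b bs ih =>
    intro s t
    by_cases hst : s = t
    · subst hst
      have h2 : ¬ (s + 1 ≤ s) := by omega
      simp [List.zipIdx_cons, ih (s + 1) s, h2]
    · have hbne : (s == t) = false := by simp [hst]
      rw [List.zipIdx_cons, List.filter_cons]
      simp only [hbne, Bool.false_eq_true, if_false]
      rw [ih (s + 1) t]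
      have hlc : (b :: bs).length = bs.length + 1 := rfl
      by_cases h : s + 1 ≤ t ∧ t - (s + 1) < bs.length
      · rw [dif_pos h, dif_pos (by rw [hlc]; omega : s ≤ t ∧ t - s < (b :: bs).length)]
        have hts : t - s = (t - (s + 1)) + 1 := by omega
        simp [hts]
      · rw [dif_neg h, dif_neg (by rw [hlc]; omega)]

theorem pvGetD_set (l : List (List (String × Int))) (i j : Nat) (v : List (String × Int))
    (hi : i < l.length) :
    (l.set i v).getD j [] = if i = j then v else l.getD j [] := by
  simp only [List.getD_eq_getElem?_getD, List.getElem?_set]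
  split_ifs <;> simp_all

-- the append-into-group fold, characterized per group
theorem pvFoldA (f : (Int × (String × Int)) → Nat) :
    ∀ (l : List (Int × (String × Int))) (acc : List (List (String × Int))),
      (∀ x ∈ l, f x < acc.length) →
      (l.foldl (fun a x => a.set (f x) (a.getD (f x) [] ++ [x.2])) acc).length = acc.length ∧
      ∀ j : Nat,
        (l.foldl (fun a x => a.set (f x) (a.getD (f x) [] ++ [x.2])) acc).getD j [] =
          acc.getD j [] ++ (l.filter (fun x => f x == j)).map (fun x => x.2) := by
  intro l
  induction l with
  | nil => intro acc _; simp
  | cons x l ih =>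
    intro acc hf
    have hx : f x < acc.length := hf x (by simp)
    set acc' := acc.set (f x) (acc.getD (f x) [] ++ [x.2]) with hacc'
    have hlen : acc'.length = acc.length := by simp [hacc']
    have hf' : ∀ y ∈ l, f y < acc'.length := by
      intro y hy; rw [hlen]; exact hf y (by simp [hy])
    obtain ⟨ihlen, ihget⟩ := ih acc' hf'
    constructor
    · rw [List.foldl_cons, ← hacc', ihlen, hlen]
    intro j
    rw [List.foldl_cons, ← hacc', ihget j, List.filter_cons]
    have hgetD : acc'.getD j [] =
        if f x = j then acc.getD j [] ++ [x.2] else acc.getD j [] := by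
      rw [hacc', pvGetD_set _ _ _ _ hx]
      by_cases h : f x = j
      · rw [if_pos h, if_pos h, h]
      · rw [if_neg h, if_neg h]
    rw [hgetD]
    by_cases h : f x = j
    · have hb : (f x == j) = true := by simp [h]
      rw [if_pos h, hb]
      simp [List.append_assoc]
    · have hb : (f x == j) = false := by simp [h]
      rw [if_neg h, hb]
      simp

-- A's group j as a filterMap over rounds
theorem pvMainA (G j : Nat) (hG : 0 < G) (hj : j < G) :
    ∀ (R : Nat) (ts : List (String × Int)), ts.length ≤ R * G →
      ((ts.zipIdx 0).filter (fun q => pvIdxN G q.2 == j)).map Prod.fst =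
        (List.range R).filterMap (pvPickN ts G j) := by
  intro R
  induction R with
  | zero =>
    intro ts hts
    have : ts = [] := List.eq_nil_of_length_eq_zero (by omega)
    simp [this]
  | succ R ih =>
    intro ts hts
    by_cases hn : ts.length ≤ R * G
    · rw [List.range_succ, List.filterMap_append]
      have hpick : pvPickN ts G j R = none := by
        unfold pvPickN
        rw [dif_neg]
        push_neg
        have := Nat.le.intro (rfl : R * G + 0 = R * G + 0)
        omega
      simp [hpick, ih ts hn]
    · have hlt : R * G < ts.length := by omega
      set n := ts.length with hnn
      set F := ts.take (R * G) with hF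
      set B := ts.drop (R * G) with hB
      have hFlen : F.length = R * G := by rw [hF, List.length_take]; omega
      have hBlen : B.length = n - R * G := by rw [hB, List.length_drop, hnn]
      have hsplit : ts = F ++ B := (List.take_append_drop _ _).symm
      conv_lhs => rw [hsplit]
      rw [List.zipIdx_append, List.filter_append, List.map_append]
      rw [List.range_succ, List.filterMap_append]
      congr 1
      · -- full rounds
        rw [ih F (by omega)]
        apply List.filterMap_congr
        intro r hr
        have hrR : r < R := by simpa using hr
        have hi : r * G + pvK0 G j r < R * G := by
          have h1 := pvK0_lt G j r hj
          have h2 : (r + 1) * G ≤ R * G := Nat.mul_le_mul_right G (by omega)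
          have h3 : (r + 1) * G = r * G + G := by ring
          omega
        unfold pvPickN
        rw [dif_pos (by omega), dif_pos (by omega)]
        congr 1
        exact List.getElem_take
      · -- the last, possibly partial round
        have hcong : ∀ q ∈ B.zipIdx (0 + F.length),
            (pvIdxN G q.2 == j) = (q.2 == R * G + pvK0 G j R) := by
          intro q hq
          have hmem := List.mem_zipIdx hq
          have hq1 : 0 + F.length ≤ q.2 := hmem.1
          have hq2 : q.2 < 0 + F.length + B.length := by
            have := hmem.2.1
            omega
          have hqlo : R * G ≤ q.2 := by omega
          have hqhi : q.2 < R * G + G := by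
            have : n ≤ (R + 1) * G := hts
            have h3 : (R + 1) * G = R * G + G := by ring
            omega
          have hdiv : q.2 / G = R := by
            refine Nat.div_eq_of_lt_le hqlo ?_
            have hrg : (R + 1) * G = R * G + G := by ring
            omega
          have hmod : q.2 % G = q.2 - R * G := by
            have hdm := Nat.div_add_mod q.2 G
            rw [hdiv] at hdm
            have hc : G * R = R * G := Nat.mul_comm G R
            omega
          unfold pvIdxN pvK0
          rw [hdiv, hmod]
          have hk := pvK0_lt G j R hj
          by_cases hpar : R % 2 = 0 <;> simp [hpar] <;> omega
        rw [List.filter_congr hcong, pvBlk B (0 + F.length) (R * G + pvK0 G j R)]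
        have hk := pvK0_lt G j R hj
        have hfm : List.filterMap (pvPickN ts G j) [R] = (pvPickN ts G j R).toList := by
          cases h : pvPickN ts G j R <;> simp [h]
        rw [hfm]
        by_cases hin : R * G + pvK0 G j R < n
        · rw [dif_pos (by omega : 0 + F.length ≤ R * G + pvK0 G j R ∧ R * G + pvK0 G j R - (0 + F.length) < B.length)]
          have he : R * G + pvK0 G j R - (0 + F.length) = pvK0 G j R := by omega
          have hp : pvPickN ts G j R = some (ts[R * G + pvK0 G j R]'(by omega)) := by
            unfold pvPickN
            exact dif_pos (by omega)
          rw [hp]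
          simp only [he, hB, List.getElem_drop, Option.toList_some]
        · have hp : pvPickN ts G j R = none := by
            unfold pvPickN
            exact dif_neg (by omega)
          rw [dif_neg (by omega), hp]
          simp

-- B's loop, characterized
theorem pvAltLoop_spec (ts : List (String × Int)) (G j : Nat) (hG : 0 < G) (hj : j < G) :
    ∀ (k r : Nat) (grp : List (String × Int)),
      r + k = (ts.length + G - 1) / G →
      pvAltLoop ts (ts.length : Int) (G : Int) (j : Int) (r : Int) grp =
        grp ++ (List.range' r k).filterMap (pvPickN ts G j) := by
  intro k
  induction k with
  | zero =>
    intro r grp hr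
    rw [pvAltLoop]
    have hnotlt : ¬ r * G < ts.length := by
      rw [pvCeil_iff _ _ _ hG]; omega
    rw [dif_neg]
    · simp
    · push_neg
      intro hlt
      exfalso
      apply hnotlt
      have : ((r * G : Nat) : Int) < (ts.length : Int) := by push_cast; push_cast at hlt; linarith
      exact_mod_cast this
  | succ k ih =>
    intro r grp hr
    have hrlt : r * G < ts.length := by
      rw [pvCeil_iff _ _ _ hG]; omega
    rw [pvAltLoop]
    rw [dif_pos ⟨by exact_mod_cast (by push_cast; exact_mod_cast hrlt : ((r * G : Nat) : Int) < (ts.length : Int)), by exact_mod_cast hG⟩]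
    have hk := pvK0_lt G j r hj
    have hmodr : PySem.Int.mod (r : Int) 2 = ((r % 2 : Nat) : Int) := by
      exact_mod_cast PySem.Int.mod_natCast r 2
    have hidx : (r : Int) * (G : Int) + (if PySem.Int.mod (r : Int) 2 = 0 then (j : Int) else (G : Int) - 1 - (j : Int)) =
        ((r * G + pvK0 G j r : Nat) : Int) := by
      rw [hmodr]
      unfold pvK0
      by_cases hpar : r % 2 = 0
      · rw [if_pos (by exact_mod_cast hpar), if_pos hpar]; push_cast; ring
      · rw [if_neg (by exact_mod_cast hpar), if_neg hpar]; push_cast [Nat.cast_sub (by omega : j ≤ G - 1), Nat.cast_sub (by omega : 1 ≤ G)]; push_cast; ring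
    rw [hidx]
    set iN := r * G + pvK0 G j r with hiN
    have hstep : (if ((iN : Nat) : Int) < (ts.length : Int) then grp ++ [PySem.List.pyGetD ts ((iN : Nat) : Int) ("", 0)] else grp) =
        grp ++ (pvPickN ts G j r).toList := by
      unfold pvPickN
      rw [← hiN]
      by_cases hin : iN < ts.length
      · rw [if_pos (by exact_mod_cast hin), dif_pos hin]
        rw [PySem.List.pyGetD_natCast]
        simp [List.getD_eq_getElem?_getD, hin]
      · rw [if_neg (by exact_mod_cast hin), dif_neg hin]
        simp
    simp only [hstep]
    have hcast : ((r : Int) + 1) = (((r + 1 : Nat)) : Int) := by push_cast; ring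
    rw [hcast, ih (r + 1) _ (by omega)]
    rw [List.range'_succ, List.filterMap_cons]
    cases hp : pvPickN ts G j r <;> simp [List.append_assoc]

theorem pvFloordiv_zero_neg (b : Int) : PySem.Int.floordiv 0 b = 0 := by
  simp [PySem.Int.floordiv]

-- main equivalence on the else-branch, for group_size ≥ 1 and length ≥ group_size
theorem pvMain (teams : List (String × Int)) (group_size : Int)
    (hgs : 1 ≤ group_size) (hlen : ¬ ((teams.length : Int) < group_size)) :
    bin_packing_fair_seeding teams group_size = bin_packing_fair_seeding_alt teams group_size := by
  unfold bin_packing_fair_seeding bin_packing_fair_seeding_alt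
  rw [if_neg hlen, if_neg hlen]
  set ts := PySem.List.sorted teams (fun x => x.2) true with hts
  have hlents : ts.length = teams.length := PySem.List.length_sorted teams _ _
  set n := ts.length with hn
  -- group_size as a Nat
  obtain ⟨gs, rfl⟩ : ∃ gs : Nat, group_size = (gs : Int) :=
    ⟨group_size.toNat, (Int.toNat_of_nonneg (by omega)).symm⟩
  have hgs1 : 1 ≤ gs := by exact_mod_cast hgs
  have hngs : gs ≤ n := by omega
  have hfd : PySem.Int.floordiv (n : Int) (gs : Int) = ((n / gs : Nat) : Int) :=
    PySem.Int.floordiv_natCast n gs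
  set G := n / gs with hG
  have hG1 : 0 < G := by
    rw [hG]
    exact Nat.one_le_div_iff (by omega) |>.mpr hngs
  simp only [← hn, hfd]
  -- the A side fold
  have hcongr : (PySem.List.enumerate ts 0).foldl (fun groups p =>
        PySem.List.pySetD groups
          (if PySem.Int.mod (PySem.Int.floordiv p.1 ((G : Nat) : Int)) 2 = 0 then PySem.Int.mod p.1 ((G : Nat) : Int)
           else ((G : Nat) : Int) - 1 - PySem.Int.mod p.1 ((G : Nat) : Int))
          (PySem.List.pyGetD groups
            (if PySem.Int.mod (PySem.Int.floordiv p.1 ((G : Nat) : Int)) 2 = 0 then PySem.Int.mod p.1 ((G : Nat) : Int)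
             else ((G : Nat) : Int) - 1 - PySem.Int.mod p.1 ((G : Nat) : Int)) [] ++ [p.2]))
        (List.replicate ((G : Nat) : Int).toNat []) =
      (PySem.List.enumerate ts 0).foldl (fun a x =>
        a.set (pvIdxN G x.1.toNat) (a.getD (pvIdxN G x.1.toNat) [] ++ [x.2]))
        (List.replicate ((G : Nat) : Int).toNat []) := by
    apply PySem.List.foldl_congr_mem
    intro acc p hp
    rw [PySem.List.mem_enumerate_iff] at hp
    obtain ⟨k, hk, hpk⟩ := hp
    have hp1 : p.1 = (k : Int) := by rw [hpk]; simp
    have hfd2 : PySem.Int.floordiv p.1 ((G : Nat) : Int) = ((k / G : Nat) : Int) := by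
      rw [hp1]; exact PySem.Int.floordiv_natCast k G
    have hmd : PySem.Int.mod p.1 ((G : Nat) : Int) = ((k % G : Nat) : Int) := by
      rw [hp1]; exact PySem.Int.mod_natCast k G
    have hmd2 : PySem.Int.mod ((k / G : Nat) : Int) 2 = (((k / G) % 2 : Nat) : Int) := by
      exact_mod_cast PySem.Int.mod_natCast (k / G) 2
    have hidx : (if PySem.Int.mod (PySem.Int.floordiv p.1 ((G : Nat) : Int)) 2 = 0 then PySem.Int.mod p.1 ((G : Nat) : Int)
        else ((G : Nat) : Int) - 1 - PySem.Int.mod p.1 ((G : Nat) : Int)) = ((pvIdxN G k : Nat) : Int) := by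
      rw [hfd2, hmd, hmd2]
      unfold pvIdxN
      have hmlt := Nat.mod_lt k hG1
      by_cases hpar : (k / G) % 2 = 0
      · rw [if_pos (by exact_mod_cast hpar), if_pos hpar]
      · rw [if_neg (by exact_mod_cast hpar), if_neg hpar]
        push_cast [Nat.cast_sub (by omega : k % G ≤ G - 1), Nat.cast_sub (by omega : 1 ≤ G)]
        ring
    have htoNat : p.1.toNat = k := by rw [hp1]; simp
    rw [hidx, htoNat, PySem.List.pySetD_natCast, PySem.List.pyGetD_natCast]
  rw [hcongr]
  -- characterize both sides and compare elementwise
  have hrep : (List.replicate ((G : Nat) : Int).toNat ([] : List (String × Int))).length = G := by simp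
  have hf : ∀ x ∈ PySem.List.enumerate ts 0,
      pvIdxN G x.1.toNat < (List.replicate ((G : Nat) : Int).toNat ([] : List (String × Int))).length := by
    intro x _; rw [hrep]; exact pvIdxN_lt G _ hG1
  obtain ⟨hAlen, hAget⟩ := pvFoldA (fun x => pvIdxN G x.1.toNat) (PySem.List.enumerate ts 0) _ hf
  rw [PySem.List.pyRange_zero_nat]
  set R := (n + G - 1) / G with hR
  have hnR : n ≤ R * G := by
    have := (pvCeil_iff G n R hG1).not
    rw [hR] at *
    omega
  apply List.ext_getElem
  · rw [hAlen, hrep]; simp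
  · intro j hj1 hj2
    have hjG : j < G := by rwa [hAlen, hrep] at hj1
    simp only [List.getElem_map, List.getElem_range]
    have hBspec := pvAltLoop_spec ts G j hG1 hjG R 0 [] (by rw [← hn]; omega)
    rw [← hn] at hBspec
    simp only [Nat.cast_zero] at hBspec
    rw [hBspec]
    have hAj : (((PySem.List.enumerate ts 0).foldl (fun a x =>
        a.set (pvIdxN G x.1.toNat) (a.getD (pvIdxN G x.1.toNat) [] ++ [x.2]))
        (List.replicate ((G : Nat) : Int).toNat []))[j]'hj1) =
        ((PySem.List.enumerate ts 0).filter (fun x => pvIdxN G x.1.toNat == j)).map (fun x => x.2) := by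
      rw [← List.getD_eq_getElem _ [] hj1, hAget j]
      have : (List.replicate ((G : Nat) : Int).toNat ([] : List (String × Int))).getD j [] = [] := by
        simp [List.getD_eq_getElem?_getD, List.getElem?_replicate]
        split <;> rfl
      rw [this, List.nil_append]
    rw [hAj]
    -- enumerate → zipIdx and conclude with pvMainA
    rw [PySem.List.enumerate_eq_zipIdx_map, List.filter_map, List.map_map]
    have hcomp : ((fun x : Int × (String × Int) => pvIdxN G x.1.toNat == j) ∘
        (fun p : (String × Int) × Nat => ((0 : Int) + (p.2 : Int), p.1))) =
        (fun q : (String × Int) × Nat => pvIdxN G q.2 == j) := by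
      funext q; simp
    rw [hcomp]
    have hmapfst : ((fun x : Int × (String × Int) => x.2) ∘
        (fun p : (String × Int) × Nat => ((0 : Int) + (p.2 : Int), p.1))) =
        (Prod.fst : (String × Int) × Nat → String × Int) := by
      funext q; rfl
    rw [hmapfst, pvMainA G j hG1 hjG R ts hnR, List.nil_append, List.range_eq_range']

-- ===== VERDICT (by name: the statement is the Claim_ definition above) =====
theorem bin_packing_fair_seeding_spec : Claim_equal_bin_packing_fair_seeding := by
  intro teams group_size _ hpre
  unfold Spec_bin_packing_fair_seeding
  rcases hpre with hgs | ⟨hnil, hneg⟩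
  · by_cases hlen : (teams.length : Int) < group_size
    · unfold bin_packing_fair_seeding bin_packing_fair_seeding_alt
      rw [if_pos hlen, if_pos hlen]
    · exact pvMain teams group_size hgs hlen
  · subst hnil
    unfold bin_packing_fair_seeding bin_packing_fair_seeding_alt
    rw [if_neg (by simp; omega), if_neg (by simp; omega)]
    simp [PySem.List.sorted, pvFloordiv_zero_neg, PySem.List.pyRange_one_eq_nil (by omega : (0:Int) ≤ 0)]
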